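-- pv_equiv track=rewrite | github.com/JJMLG/JJMLG | 04.18 ~ 04.25 2023 KAKAO TECH INTERNSHIP/C - 등산코스 정하기/혜진.py | solution
-- ===== SOURCE A (Python) =====
-- from heapq import heappush, heappop
--
-- def solution(n, paths, gates, summits):
--     inf = 10000000 * n
--     adj = [[] for _ in range(n + 1)]    # 인접리스트
--     isSummit = [False] * (n + 1)        # 산봉우리인지 확인
--     intensity = [inf] * (n + 1)         # i까지 갈 때 intensity값, 최소가 되어야 하니까 최대로 초기화하고 시작
--     Q = []                              # 우선순위 큐 -> 기준은 intensity가 최소가 되도록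
--
--     for i, j, w in paths:
--         adj[i].append((j, w))
--         adj[j].append((i, w))
--
--     for s in set(summits):
--         isSummit[s] = True
--
--     for g in gates:
--         intensity[g] = 0                # (intensity값, 현재 위치)
--         heappush(Q, (0, g))             # intensity가 최소가 되어야하니까 먼저 쓴다
--
--     while Q:
--         itst, v = heappop(Q)
--         if isSummit[v]:                 # 산봉우리면 그만 -> 산봉우리까지 갈때의 intensity값을 구하기 위한 우선순위큐
--             continue
--         if itst > intensity[v]:         # 더 크면 그만 -> intensity값을 최소로 만들어야하니까
--             continue
--
--         for nv, nitst in adj[v]: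
--             nitst = max(intensity[v], nitst)    # 가장 큰 값 중에서
--             if nitst < intensity[nv]:           # 최소로 만들어야 하니까 작은 경우만 확인, nv가 gate인 경우는 여기서 걸러짐
--                 intensity[nv] = nitst           # 작은 값으로 갱신
--                 heappush(Q, (nitst, nv))
--
--     ans = [0, inf]
--     for s in sorted(summits):           # intensity가 최소인 경우가 많으면 산봉우리번호가 작은걸 return해야하니까 정렬해서 확인
--         if intensity[s] < ans[1]:       # 산봉우리까지 갈 때의 intensity값을 확인한다
--             ans = [s, intensity[s]]
--     return ans
-- ===== SOURCE B (Python) =====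
-- def solution(n, paths, gates, summits):
--     # Bellman-Ford-style relaxation over the raw edge list (no heap, no adjacency
--     # structure): sweep all directed edges until no intensity value changes.
--     inf = 10000000 * n
--     size = n + 1
--     intensity = [inf] * size
--     is_summit = [False] * size
--     for s in summits:
--         is_summit[s] = True
--     for g in gates:
--         intensity[g] = 0
--     edges = []
--     for i, j, w in paths:
--         edges.append((i, j, w))
--         edges.append((j, i, w))
--     changed = True
--     while changed:
--         changed = False
--         for u, v, w in edges:
--             if is_summit[u]:        # a summit may never be an intermediate node
--                 continue
--             t = max(intensity[u], w)
--             if t < intensity[v]: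
--                 intensity[v] = t
--                 changed = True
--     ans = [0, inf]
--     for s in sorted(summits):
--         if intensity[s] < ans[1]:
--             ans = [s, intensity[s]]
--     return ans
-- ===== Notes on version B (the rewrite author's own statement) =====
-- stated objective: alternative
-- what changed: Replaces the heap-based lazy Dijkstra over an adjacency list by Bellman-Ford-style rounds over the raw directed-edge list, relaxing until no value changes (no heap, no adjacency structure).
import Mathlib
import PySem

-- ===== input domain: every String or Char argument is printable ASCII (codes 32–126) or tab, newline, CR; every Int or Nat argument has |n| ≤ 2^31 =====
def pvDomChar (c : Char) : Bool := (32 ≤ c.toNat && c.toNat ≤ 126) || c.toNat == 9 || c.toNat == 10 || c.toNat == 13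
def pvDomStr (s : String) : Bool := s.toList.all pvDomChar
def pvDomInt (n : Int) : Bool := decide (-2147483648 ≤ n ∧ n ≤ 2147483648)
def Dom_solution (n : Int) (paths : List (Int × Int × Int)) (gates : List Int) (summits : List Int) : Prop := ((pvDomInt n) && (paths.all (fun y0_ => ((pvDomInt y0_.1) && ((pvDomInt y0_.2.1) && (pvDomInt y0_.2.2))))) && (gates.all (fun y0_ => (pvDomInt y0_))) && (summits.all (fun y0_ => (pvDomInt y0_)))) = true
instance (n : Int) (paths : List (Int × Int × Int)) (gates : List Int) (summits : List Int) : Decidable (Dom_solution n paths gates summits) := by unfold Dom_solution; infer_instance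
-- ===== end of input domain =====

-- B replaces the heap-based lazy Dijkstra over an adjacency list by Bellman-Ford-style
-- relaxation sweeps over the raw directed-edge list until no value changes (alternative
-- algorithm, not claimed faster).


-- ===== PORT A =====
-- heapq on a list of int pairs: entries are pure values compared lexicographically, so
-- heappush/heappop are observationally exact as 'add to the multiset' / 'remove and
-- return the minimum value' — ported here as append and pop-of-lexicographic-minimum.
def pvTupLt (a b : Int × Int) : Bool := a.1 < b.1 || (a.1 == b.1 && a.2 < b.2)

def pvPopMin (Q : List (Int × Int)) : Option ((Int × Int) × List (Int × Int)) :=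
  match Q with
  | [] => none
  | q :: qs =>
      let m := qs.foldl (fun m x => if pvTupLt x m then x else m) q
      some (m, (q :: qs).erase m)

-- the 'while Q:' loop; fuel only makes the recursion total (proved sufficient below)
def pvLoopA (adj : List (List (Int × Int))) (isSummit : List Bool) :
    Nat → List Int → List (Int × Int) → List Int
  | 0, I, _ => I
  | fuel+1, I, Q =>
    match pvPopMin Q with
    | none => I
    | some ((itst, v), Q') =>
      if PySem.List.pyGetD isSummit v false then pvLoopA adj isSummit fuel I Q'
      else if PySem.List.pyGetD I v 0 < itst then pvLoopA adj isSummit fuel I Q'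
      else
        let st := (PySem.List.pyGetD adj v []).foldl
          (fun (p : List Int × List (Int × Int)) nw =>
            let nitst := max (PySem.List.pyGetD p.1 v 0) nw.2
            if nitst < PySem.List.pyGetD p.1 nw.1 0 then
              (PySem.List.pySetD p.1 nw.1 nitst, p.2 ++ [(nitst, nw.1)])
            else p) (I, Q')
        pvLoopA adj isSummit fuel st.1 st.2

def solution (n : Int) (paths : List (Int × Int × Int)) (gates : List Int) (summits : List Int) : List Int :=
  let inf := 10000000 * n
  let L := (n + 1).toNat
  let adj := paths.foldl (fun a e =>
      let a1 := PySem.List.pySetD a e.1 (PySem.List.pyGetD a e.1 [] ++ [(e.2.1, e.2.2)])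
      PySem.List.pySetD a1 e.2.1 (PySem.List.pyGetD a1 e.2.1 [] ++ [(e.1, e.2.2)]))
    (List.replicate L ([] : List (Int × Int)))
  let isSummit := (PySem.Set.ofList summits).foldl (fun a s => PySem.List.pySetD a s true)
    (List.replicate L false)
  let IQ := gates.foldl (fun (p : List Int × List (Int × Int)) g =>
      (PySem.List.pySetD p.1 g 0, p.2 ++ [((0 : Int), g)])) (List.replicate L inf, [])
  let I := pvLoopA adj isSummit (IQ.2.length + L * (paths.length + 2) + 1) IQ.1 IQ.2
  let ans := (PySem.List.sorted summits (fun x => x) false).foldl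
      (fun (a : Int × Int) s =>
        if PySem.List.pyGetD I s 0 < a.2 then (s, PySem.List.pyGetD I s 0) else a) (0, inf)
  [ans.1, ans.2]

-- ===== PORT B =====
def pvRelaxRound (edges : List (Int × Int × Int)) (isSummit : List Bool)
    (st : List Int × Bool) : List Int × Bool :=
  edges.foldl (fun st e =>
    if PySem.List.pyGetD isSummit e.1 false then st
    else
      let t := max (PySem.List.pyGetD st.1 e.1 0) e.2.2
      if t < PySem.List.pyGetD st.1 e.2.1 0 then (PySem.List.pySetD st.1 e.2.1 t, true)
      else st) st

-- the 'while changed:' loop; fuel only makes the recursion total (proved sufficient below)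
def pvLoopB (edges : List (Int × Int × Int)) (isSummit : List Bool) :
    Nat → List Int → List Int
  | 0, I => I
  | fuel+1, I =>
      let st := pvRelaxRound edges isSummit (I, false)
      if st.2 then pvLoopB edges isSummit fuel st.1 else st.1

def solution_alt (n : Int) (paths : List (Int × Int × Int)) (gates : List Int) (summits : List Int) : List Int :=
  let inf := 10000000 * n
  let size := (n + 1).toNat
  let isSummit := summits.foldl (fun a s => PySem.List.pySetD a s true) (List.replicate size false)
  let intensity := gates.foldl (fun I g => PySem.List.pySetD I g (0 : Int)) (List.replicate size inf)
  let edges := paths.foldl (fun es e => es ++ [(e.1, e.2.1, e.2.2), (e.2.1, e.1, e.2.2)]) []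
  let I := pvLoopB edges isSummit (size * (paths.length + 2) + 1) intensity
  let ans := (PySem.List.sorted summits (fun x => x) false).foldl
      (fun (a : Int × Int) s =>
        if PySem.List.pyGetD I s 0 < a.2 then (s, PySem.List.pyGetD I s 0) else a) (0, inf)
  [ans.1, ans.2]

-- ===== PRECONDITION & SPEC =====
-- Pre_ excludes exactly the inputs on which A raises IndexError: a node id in paths,
-- gates or summits outside the valid Python index range [-(n+1), n] of the size-(n+1) arrays.
def Pre_solution (n : Int) (paths : List (Int × Int × Int)) (gates : List Int) (summits : List Int) : Prop :=
  (∀ e ∈ paths, PySem.Raise.InRange (n + 1).toNat e.1 ∧ PySem.Raise.InRange (n + 1).toNat e.2.1) ∧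
  (∀ g ∈ gates, PySem.Raise.InRange (n + 1).toNat g) ∧
  (∀ s ∈ summits, PySem.Raise.InRange (n + 1).toNat s)
instance (n : Int) (paths : List (Int × Int × Int)) (gates : List Int) (summits : List Int) : Decidable (Pre_solution n paths gates summits) := by unfold Pre_solution; infer_instance

def pvWitness_solution : Int × (List (Int × Int × Int)) × List Int × List Int :=
  (6, [(1, 2, 3), (2, 3, 5), (2, 4, 2), (2, 5, 4), (3, 4, 4), (4, 5, 3), (4, 6, 1), (5, 6, 1)], [1, 3], [5])

def Spec_solution (n : Int) (paths : List (Int × Int × Int)) (gates : List Int) (summits : List Int) (out : List Int) : Prop := out = solution_alt n paths gates summits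
instance (n : Int) (paths : List (Int × Int × Int)) (gates : List Int) (summits : List Int) (out : List Int) : Decidable (Spec_solution n paths gates summits out) := by unfold Spec_solution; infer_instance

-- ===== CLAIM (what is proved, stated in full; the proofs are below) =====
def Claim_equal_solution : Prop := ∀ (n : Int) (paths : List (Int × Int × Int)) (gates : List Int) (summits : List Int), Dom_solution n paths gates summits → Pre_solution n paths gates summits → Spec_solution n paths gates summits (solution n paths gates summits)

-- ===== LEMMAS AND PROOFS =====

-- ===== VERDICT (by name: the statement is the Claim_ definition above) =====

def pvSlot (L : Nat) (v : Int) : Nat := if 0 ≤ v then v.toNat else L - (-v).toNat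

lemma pvSlot_lt {L : Nat} {v : Int} (h : PySem.Raise.InRange L v) : pvSlot L v < L := by
  unfold PySem.Raise.InRange at h; unfold pvSlot; split <;> omega

lemma pvIdx_eq_slot {L : Nat} {v : Int} (h : PySem.Raise.InRange L v) :
    PySem.List.pyIdx? L v = some (pvSlot L v) := by
  unfold PySem.Raise.InRange at h; unfold PySem.List.pyIdx? pvSlot
  split <;> split <;> first | rfl | omega

lemma pvGetD_slot {α : Type} (xs : List α) (v : Int) (d : α)
    (h : PySem.Raise.InRange xs.length v) :
    PySem.List.pyGetD xs v d = xs.getD (pvSlot xs.length v) d := by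
  unfold PySem.List.pyGetD PySem.List.pyGet?
  rw [pvIdx_eq_slot h]
  simp [List.getD]

lemma pvSetD_slot {α : Type} (xs : List α) (v : Int) (x : α)
    (h : PySem.Raise.InRange xs.length v) :
    PySem.List.pySetD xs v x = xs.set (pvSlot xs.length v) x := by
  unfold PySem.List.pySetD PySem.List.pySet?
  rw [pvIdx_eq_slot h]
  rfl

lemma pvGetD_set_eq (I : List Int) (i : Nat) (v : Int) (h : i < I.length) :
    (I.set i v).getD i 0 = v := by
  simp [List.getD, h]

lemma pvGetD_set_ne (I : List Int) (i k : Nat) (v : Int) (h : k ≠ i) :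
    (I.set i v).getD k 0 = I.getD k 0 := by
  simp [List.getD, h.symm]

lemma pvGetD_set_eq' {α : Type} (I : List α) (i : Nat) (v d : α) (h : i < I.length) :
    (I.set i v).getD i d = v := by
  simp [List.getD, h]

lemma pvGetD_set_ne' {α : Type} (I : List α) (i k : Nat) (v d : α) (h : k ≠ i) :
    (I.set i v).getD k d = I.getD k d := by
  simp [List.getD, h.symm]

inductive pvReach (SE : List (Nat × Nat × Int)) : List Int → List Int → Prop
  | refl (I : List Int) : pvReach SE I I
  | step {I J : List Int} {e : Nat × Nat × Int} : pvReach SE I J → e ∈ SE →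
      max (J.getD e.1 0) e.2.2 < J.getD e.2.1 0 →
      pvReach SE I (J.set e.2.1 (max (J.getD e.1 0) e.2.2))

def pvStable (SE : List (Nat × Nat × Int)) (I : List Int) : Prop :=
  ∀ e ∈ SE, I.getD e.2.1 0 ≤ max (I.getD e.1 0) e.2.2

lemma pvReach_length {SE : List (Nat × Nat × Int)} {I J : List Int} (h : pvReach SE I J) :
    J.length = I.length := by
  induction h with
  | refl => rfl
  | step _ _ _ ih => simpa using ih

lemma pvReach_trans {SE : List (Nat × Nat × Int)} {I J K : List Int}
    (h1 : pvReach SE I J) (h2 : pvReach SE J K) : pvReach SE I K := by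
  induction h2 with
  | refl => exact h1
  | step h e r ih => exact pvReach.step ih e r

lemma pvReach_le {SE : List (Nat × Nat × Int)} {I J : List Int} (h : pvReach SE I J) :
    ∀ k, J.getD k 0 ≤ I.getD k 0 := by
  induction h with
  | refl => exact fun _ => le_refl _
  | @step J' e h hm hr ih =>
    intro k
    by_cases hk : k = e.2.1
    · subst hk
      by_cases hlt : e.2.1 < J'.length
      · rw [pvGetD_set_eq _ _ _ hlt]; exact le_trans (le_of_lt hr) (ih _)
      · rw [List.set_eq_of_length_le (by omega)]; exact ih _
    · rw [pvGetD_set_ne _ _ _ _ hk]; exact ih _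

lemma pvStable_le {SE : List (Nat × Nat × Int)} {I0 J I : List Int}
    (hJ : pvStable SE J) (hJ0 : ∀ k, J.getD k 0 ≤ I0.getD k 0)
    (h : pvReach SE I0 I) : ∀ k, J.getD k 0 ≤ I.getD k 0 := by
  induction h with
  | refl => exact hJ0
  | @step J' e h hm hr ih =>
    intro k
    by_cases hk : k = e.2.1
    · subst hk
      by_cases hlt : e.2.1 < J'.length
      · rw [pvGetD_set_eq _ _ _ hlt]
        exact le_trans (hJ e hm) (max_le_max (ih _) (le_refl _))
      · rw [List.set_eq_of_length_le (by omega)]; exact ih _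
    · rw [pvGetD_set_ne _ _ _ _ hk]; exact ih _

lemma pvReach_stable_eq {SE : List (Nat × Nat × Int)} {I0 A B : List Int}
    (hA : pvReach SE I0 A) (hAs : pvStable SE A)
    (hB : pvReach SE I0 B) (hBs : pvStable SE B) : A = B := by
  have h1 : ∀ k, A.getD k 0 ≤ B.getD k 0 := pvStable_le hAs (pvReach_le hA) hB
  have h2 : ∀ k, B.getD k 0 ≤ A.getD k 0 := pvStable_le hBs (pvReach_le hB) hA
  have hlen : A.length = B.length := by rw [pvReach_length hA, pvReach_length hB]
  apply List.ext_getElem hlen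
  intro k hk1 hk2
  have := le_antisymm (h1 k) (h2 k)
  rwa [List.getD_eq_getElem A 0 hk1, List.getD_eq_getElem B 0 hk2] at this

-- potential
def pvCB (V : List Int) (x : Int) : Nat := (V.toFinset.filter (fun y => y < x)).card

def pvPhiI (V : List Int) (L : Nat) (I : List Int) : Nat :=
  ∑ k ∈ Finset.range L, pvCB V (I.getD k 0)

lemma pvCB_lt {V : List Int} {old new : Int} (hnew : new ∈ V) (hlt : new < old) :
    pvCB V new < pvCB V old := by
  apply Finset.card_lt_card
  constructor
  · intro y hy
    simp only [Finset.mem_filter] at *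
    exact ⟨hy.1, lt_trans hy.2 hlt⟩
  · intro hsub
    have : new ∈ Finset.filter (fun y => y < old) V.toFinset := by
      simp [List.mem_toFinset.2 hnew, hlt]
    have := hsub this
    simp at this
lemma pvPhiI_set (V : List Int) (L : Nat) (I : List Int) (dst : Nat) (v : Int)
    (hdst : dst < L) (hIlen : dst < I.length) :
    pvPhiI V L (I.set dst v) + pvCB V (I.getD dst 0) = pvPhiI V L I + pvCB V v := by
  unfold pvPhiI
  have hmem : dst ∈ Finset.range L := Finset.mem_range.2 hdst
  rw [← Finset.sum_erase_add _ _ hmem, ← Finset.sum_erase_add _ _ hmem]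
  have hcong : ∑ k ∈ (Finset.range L).erase dst, pvCB V ((I.set dst v).getD k 0)
      = ∑ k ∈ (Finset.range L).erase dst, pvCB V (I.getD k 0) := by
    apply Finset.sum_congr rfl
    intro k hk
    rw [pvGetD_set_ne _ _ _ _ (Finset.ne_of_mem_erase hk)]
  rw [hcong]
  rw [pvGetD_set_eq _ _ _ hIlen]; ring

def pvDirEdges (paths : List (Int × Int × Int)) : List (Int × Int × Int) :=
  paths.flatMap (fun e => [(e.1, e.2.1, e.2.2), (e.2.1, e.1, e.2.2)])

def pvSE (L : Nat) (IS : List Bool) (E0 : List (Int × Int × Int)) : List (Nat × Nat × Int) :=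
  ((E0.map (fun e => (pvSlot L e.1, pvSlot L e.2.1, e.2.2))).filter (fun e => !(IS.getD e.1 false)))

lemma pvRoundB_spec (L : Nat) (V : List Int) (IS : List Bool) (E0 : List (Int × Int × Int))
    (hIS : IS.length = L)
    (hE0 : ∀ e ∈ E0, PySem.Raise.InRange L e.1 ∧ PySem.Raise.InRange L e.2.1 ∧ e.2.2 ∈ V) :
    ∀ (E : List (Int × Int × Int)) (I : List Int) (ch : Bool),
    (∀ e ∈ E, e ∈ E0) → I.length = L → (∀ k, k < L → I.getD k 0 ∈ V) →
    ((pvRelaxRound E IS (I, ch)).1.length = L ∧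
     pvReach (pvSE L IS E0) I (pvRelaxRound E IS (I, ch)).1 ∧
     (∀ k, k < L → (pvRelaxRound E IS (I, ch)).1.getD k 0 ∈ V) ∧
     pvPhiI V L (pvRelaxRound E IS (I, ch)).1 ≤ pvPhiI V L I ∧
     (ch = true → (pvRelaxRound E IS (I, ch)).2 = true) ∧
     (ch = false → (pvRelaxRound E IS (I, ch)).2 = true →
        pvPhiI V L (pvRelaxRound E IS (I, ch)).1 < pvPhiI V L I) ∧
     ((pvRelaxRound E IS (I, ch)).2 = false → (pvRelaxRound E IS (I, ch)).1 = I ∧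
       ∀ e ∈ E, IS.getD (pvSlot L e.1) false = false →
         I.getD (pvSlot L e.2.1) 0 ≤ max (I.getD (pvSlot L e.1) 0) e.2.2)) := by
  intro E
  induction E with
  | nil =>
    intro I ch _ hlen hval
    refine ⟨hlen, pvReach.refl I, hval, le_refl _, ?_, ?_, ?_⟩
    · intro h; simpa [pvRelaxRound] using h
    · intro h1 h2; simp [pvRelaxRound] at h2; rw [h2] at h1; cases h1
    · intro _; exact ⟨rfl, by intro e he; cases he⟩
  | cons e E' ih =>
    intro I ch hsub hlen hval
    have heE0 := hsub e (List.mem_cons_self ..)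
    obtain ⟨hsrc, hdst, hwV⟩ := hE0 e heE0
    have hsrcIS : PySem.Raise.InRange IS.length e.1 := by rw [hIS]; exact hsrc
    have hsrcI : PySem.Raise.InRange I.length e.1 := by rw [hlen]; exact hsrc
    have hdstI : PySem.Raise.InRange I.length e.2.1 := by rw [hlen]; exact hdst
    have hslotsrc : pvSlot L e.1 < L := pvSlot_lt hsrc
    have hslotdst : pvSlot L e.2.1 < L := pvSlot_lt hdst
    have hsub' : ∀ f ∈ E', f ∈ E0 := fun f hf => hsub f (List.mem_cons_of_mem _ hf)
    have hstep : pvRelaxRound (e :: E') IS (I, ch) =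
        pvRelaxRound E' IS (if PySem.List.pyGetD IS e.1 false then (I, ch)
          else if max (PySem.List.pyGetD I e.1 0) e.2.2 < PySem.List.pyGetD I e.2.1 0 then
            (PySem.List.pySetD I e.2.1 (max (PySem.List.pyGetD I e.1 0) e.2.2), true)
          else (I, ch)) := by
      simp only [pvRelaxRound, List.foldl_cons]
    by_cases hsummit : PySem.List.pyGetD IS e.1 false
    · -- summit source: skipped
      rw [hstep]; simp only [hsummit, if_true]
      obtain ⟨c1, c2, c3, c4, c5, c6, c7⟩ := ih I ch hsub' hlen hval
      refine ⟨c1, c2, c3, c4, c5, c6, ?_⟩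
      intro hf
      obtain ⟨hI, hst⟩ := c7 hf
      refine ⟨hI, ?_⟩
      intro f hf'
      rcases List.mem_cons.1 hf' with rfl | hf''
      · intro hfsum
        rw [pvGetD_slot IS f.1 false hsrcIS, hIS] at hsummit
        rw [hsummit] at hfsum; cases hfsum
      · exact hst f hf''
    · -- non-summit source
      have hsummit' : IS.getD (pvSlot L e.1) false = false := by
        rw [pvGetD_slot IS e.1 false hsrcIS, hIS] at hsummit
        simpa using hsummit
      rw [hstep]; simp only [hsummit, if_false, Bool.false_eq_true]
      set t := max (PySem.List.pyGetD I e.1 0) e.2.2 with ht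
      have htslot : t = max (I.getD (pvSlot L e.1) 0) e.2.2 := by
        rw [ht, pvGetD_slot I e.1 0 hsrcI, hlen]
      by_cases hrel : t < PySem.List.pyGetD I e.2.1 0
      · -- relaxation fires
        rw [if_pos hrel]
        have hrel' : max (I.getD (pvSlot L e.1) 0) e.2.2 < I.getD (pvSlot L e.2.1) 0 := by
          rw [← htslot]; rwa [pvGetD_slot I e.2.1 0 hdstI, hlen] at hrel
        have hsetslot : PySem.List.pySetD I e.2.1 t = I.set (pvSlot L e.2.1) t := by
          rw [pvSetD_slot I e.2.1 t hdstI, hlen]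
        have hfSE : (pvSlot L e.1, pvSlot L e.2.1, e.2.2) ∈ pvSE L IS E0 := by
          unfold pvSE
          rw [List.mem_filter]
          refine ⟨List.mem_map.2 ⟨e, heE0, rfl⟩, by simpa [List.getD] using hsummit'⟩
        have hreach1 : pvReach (pvSE L IS E0) I (I.set (pvSlot L e.2.1) t) := by
          rw [htslot]
          exact pvReach.step (pvReach.refl I) hfSE hrel'
        have hlen1 : (I.set (pvSlot L e.2.1) t).length = L := by simpa using hlen
        have htV : t ∈ V := by
          rw [htslot]
          rcases max_cases (I.getD (pvSlot L e.1) 0) e.2.2 with ⟨h, _⟩ | ⟨h, _⟩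
          · rw [h]; exact hval _ hslotsrc
          · rw [h]; exact hwV
        have hval1 : ∀ k, k < L → (I.set (pvSlot L e.2.1) t).getD k 0 ∈ V := by
          intro k hk
          by_cases hke : k = pvSlot L e.2.1
          · subst hke; rw [pvGetD_set_eq _ _ _ (by omega)]; exact htV
          · rw [pvGetD_set_ne _ _ _ _ hke]; exact hval k hk
        have hphi : pvPhiI V L (I.set (pvSlot L e.2.1) t) < pvPhiI V L I := by
          have heq := pvPhiI_set V L I (pvSlot L e.2.1) t hslotdst (by omega)
          have hcb : pvCB V t < pvCB V (I.getD (pvSlot L e.2.1) 0) := by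
            apply pvCB_lt htV
            rw [htslot]; exact hrel'
          omega
        obtain ⟨c1, c2, c3, c4, c5, c6, c7⟩ :=
          ih (I.set (pvSlot L e.2.1) t) true hsub' hlen1 hval1
        rw [hsetslot]
        refine ⟨c1, pvReach_trans hreach1 c2, c3, le_trans c4 (le_of_lt hphi), fun _ => c5 rfl, ?_, ?_⟩
        · intro _ _; exact lt_of_le_of_lt c4 hphi
        · intro hf; rw [c5 rfl] at hf; cases hf
      · -- no relaxation
        rw [if_neg hrel]
        obtain ⟨c1, c2, c3, c4, c5, c6, c7⟩ := ih I ch hsub' hlen hval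
        refine ⟨c1, c2, c3, c4, c5, c6, ?_⟩
        intro hf
        obtain ⟨hI, hst⟩ := c7 hf
        refine ⟨hI, ?_⟩
        intro f hf'
        rcases List.mem_cons.1 hf' with rfl | hf''
        · intro _
          rw [← htslot]
          rw [pvGetD_slot I f.2.1 0 (by rw [hlen]; exact hdst), hlen] at hrel
          omega
        · exact hst f hf''

lemma pvLoopB_spec (L : Nat) (V : List Int) (IS : List Bool) (E0 : List (Int × Int × Int))
    (hIS : IS.length = L)
    (hE0 : ∀ e ∈ E0, PySem.Raise.InRange L e.1 ∧ PySem.Raise.InRange L e.2.1 ∧ e.2.2 ∈ V) :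
    ∀ (fuel : Nat) (I : List Int), I.length = L → (∀ k, k < L → I.getD k 0 ∈ V) →
    pvPhiI V L I < fuel →
    (pvLoopB E0 IS fuel I).length = L ∧
    pvReach (pvSE L IS E0) I (pvLoopB E0 IS fuel I) ∧
    pvStable (pvSE L IS E0) (pvLoopB E0 IS fuel I) := by
  intro fuel
  induction fuel with
  | zero => intro I _ _ h; omega
  | succ fuel ih =>
    intro I hlen hval hfuel
    obtain ⟨c1, c2, c3, c4, c5, c6, c7⟩ :=
      pvRoundB_spec L V IS E0 hIS hE0 E0 I false (fun e he => he) hlen hval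
    have hunf : pvLoopB E0 IS (fuel+1) I =
        if (pvRelaxRound E0 IS (I, false)).2 then pvLoopB E0 IS fuel (pvRelaxRound E0 IS (I, false)).1
        else (pvRelaxRound E0 IS (I, false)).1 := rfl
    rw [hunf]
    by_cases hflag : (pvRelaxRound E0 IS (I, false)).2
    · rw [if_pos hflag]
      have hphi : pvPhiI V L (pvRelaxRound E0 IS (I, false)).1 < pvPhiI V L I := c6 rfl hflag
      obtain ⟨d1, d2, d3⟩ := ih (pvRelaxRound E0 IS (I, false)).1 c1 c3 (by omega)
      exact ⟨d1, pvReach_trans c2 d2, d3⟩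
    · rw [if_neg hflag]
      obtain ⟨hI, hst⟩ := c7 (by simpa using hflag)
      rw [hI]
      refine ⟨hlen, pvReach.refl I, ?_⟩
      intro f hf
      unfold pvSE at hf
      rw [List.mem_filter] at hf
      obtain ⟨hmap, hfilt⟩ := hf
      obtain ⟨e, he, rfl⟩ := List.mem_map.1 hmap
      have : IS.getD (pvSlot L e.1) false = false := by
        simpa [List.getD] using hfilt
      simpa using hst e he this

lemma pvFoldMin_mem (qs : List (Int × Int)) : ∀ q : Int × Int,
    qs.foldl (fun m x => if pvTupLt x m then x else m) q ∈ q :: qs := by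
  induction qs with
  | nil => intro q; simp
  | cons x xs ih =>
    intro q
    simp only [List.foldl_cons]
    rcases List.mem_cons.1 (ih (if pvTupLt x q then x else q)) with h | h
    · by_cases hx : pvTupLt x q
      · rw [h, if_pos hx]; simp
      · rw [h, if_neg hx]; simp
    · simp [h]

lemma pvPopMin_none {Q : List (Int × Int)} (h : pvPopMin Q = none) : Q = [] := by
  cases Q with
  | nil => rfl
  | cons q qs => simp [pvPopMin] at h

lemma pvPopMin_some {Q : List (Int × Int)} {m : Int × Int} {Q' : List (Int × Int)}
    (h : pvPopMin Q = some (m, Q')) : m ∈ Q ∧ Q' = Q.erase m := by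
  cases Q with
  | nil => simp [pvPopMin] at h
  | cons q qs =>
    simp only [pvPopMin, Option.some.injEq, Prod.mk.injEq] at h
    obtain ⟨h1, h2⟩ := h
    subst h1
    exact ⟨pvFoldMin_mem qs q, h2.symm⟩

def pvStableAt (SE : List (Nat × Nat × Int)) (I : List Int) (k : Nat) : Prop :=
  ∀ e ∈ SE, e.1 = k → I.getD e.2.1 0 ≤ max (I.getD k 0) e.2.2

lemma pvStableAt_mono {SE : List (Nat × Nat × Int)} {I J : List Int} {k : Nat}
    (h : pvStableAt SE I k) (hle : ∀ j, J.getD j 0 ≤ I.getD j 0)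
    (hk : J.getD k 0 = I.getD k 0) : pvStableAt SE J k := by
  intro e he h1
  rw [hk]
  exact le_trans (hle _) (h e he h1)

lemma pvRelaxFoldA (L : Nat) (V : List Int) (IS : List Bool) (adj : List (List (Int × Int)))
    (E0 : List (Int × Int × Int)) (hIS : IS.length = L)
    (hE0 : ∀ e ∈ E0, PySem.Raise.InRange L e.1 ∧ PySem.Raise.InRange L e.2.1 ∧ e.2.2 ∈ V)
    (hadj : ∀ v : Int, PySem.Raise.InRange L v → ∀ x : Int × Int,
      (x ∈ adj.getD (pvSlot L v) [] ↔
        ∃ e ∈ E0, pvSlot L e.1 = pvSlot L v ∧ x.1 = e.2.1 ∧ x.2 = e.2.2))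
    (v : Int) (hv : PySem.Raise.InRange L v)
    (hvsum : IS.getD (pvSlot L v) false = false) :
    ∀ (xs : List (Int × Int)) (I : List Int) (Q : List (Int × Int)),
    (∀ x ∈ xs, x ∈ adj.getD (pvSlot L v) []) →
    I.length = L → (∀ k, k < L → I.getD k 0 ∈ V) →
    (∀ q ∈ Q, PySem.Raise.InRange L q.2 ∧ I.getD (pvSlot L q.2) 0 ≤ q.1) →
    (let r := xs.foldl (fun (p : List Int × List (Int × Int)) nw =>
        let nitst := max (PySem.List.pyGetD p.1 v 0) nw.2
        if nitst < PySem.List.pyGetD p.1 nw.1 0 then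
          (PySem.List.pySetD p.1 nw.1 nitst, p.2 ++ [(nitst, nw.1)])
        else p) (I, Q)
     r.1.length = L ∧
     pvReach (pvSE L IS E0) I r.1 ∧
     (∀ k, k < L → r.1.getD k 0 ∈ V) ∧
     r.1.getD (pvSlot L v) 0 = I.getD (pvSlot L v) 0 ∧
     (∀ q ∈ r.2, PySem.Raise.InRange L q.2 ∧ r.1.getD (pvSlot L q.2) 0 ≤ q.1) ∧
     (∀ q ∈ Q, q ∈ r.2) ∧
     (∀ k, k < L → r.1.getD k 0 = I.getD k 0 ∨
        ∃ q ∈ r.2, pvSlot L q.2 = k ∧ q.1 = r.1.getD k 0) ∧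
     r.2.length + pvPhiI V L r.1 ≤ Q.length + pvPhiI V L I ∧
     (∀ x ∈ xs, r.1.getD (pvSlot L x.1) 0 ≤ max (r.1.getD (pvSlot L v) 0) x.2)) := by
  intro xs
  induction xs with
  | nil =>
    intro I Q _ hlen hval hQ
    refine ⟨hlen, pvReach.refl I, hval, rfl, hQ, fun q hq => hq, fun k _ => Or.inl rfl,
      le_refl _, fun x hx => absurd hx (List.not_mem_nil)⟩
  | cons x xs ih =>
    intro I Q hxs hlen hval hQ
    have hxadj := hxs x (List.mem_cons_self ..)
    obtain ⟨e, heE0, hesrc, hx1, hx2⟩ := (hadj v hv x).1 hxadj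
    obtain ⟨heI1, heI2, hewV⟩ := hE0 e heE0
    have hx1R : PySem.Raise.InRange L x.1 := by rw [hx1]; exact heI2
    have hvI : PySem.Raise.InRange I.length v := by rw [hlen]; exact hv
    have hx1I : PySem.Raise.InRange I.length x.1 := by rw [hlen]; exact hx1R
    have hslotv : pvSlot L v < L := pvSlot_lt hv
    have hslotx : pvSlot L x.1 < L := pvSlot_lt hx1R
    have hxs' : ∀ y ∈ xs, y ∈ adj.getD (pvSlot L v) [] :=
      fun y hy => hxs y (List.mem_cons_of_mem _ hy)
    simp only [List.foldl_cons]
    set nitst := max (PySem.List.pyGetD I v 0) x.2 with hnit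
    have hnitslot : nitst = max (I.getD (pvSlot L v) 0) x.2 := by
      rw [hnit, pvGetD_slot I v 0 hvI, hlen]
    by_cases hrel : nitst < PySem.List.pyGetD I x.1 0
    · -- push
      rw [if_pos hrel]
      have hrel' : max (I.getD (pvSlot L v) 0) x.2 < I.getD (pvSlot L x.1) 0 := by
        rw [← hnitslot]; rwa [pvGetD_slot I x.1 0 hx1I, hlen] at hrel
      have hne : pvSlot L x.1 ≠ pvSlot L v := by
        intro hcontra
        rw [hcontra] at hrel'
        omega
      have hsetslot : PySem.List.pySetD I x.1 nitst = I.set (pvSlot L x.1) nitst := by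
        rw [pvSetD_slot I x.1 nitst hx1I, hlen]
      have hfSE : (pvSlot L v, pvSlot L x.1, x.2) ∈ pvSE L IS E0 := by
        unfold pvSE
        rw [List.mem_filter]
        refine ⟨List.mem_map.2 ⟨e, heE0, ?_⟩, by simpa [List.getD] using hvsum⟩
        rw [hesrc, hx1, hx2]
      have hreach1 : pvReach (pvSE L IS E0) I (I.set (pvSlot L x.1) nitst) := by
        rw [hnitslot]
        exact pvReach.step (pvReach.refl I) hfSE hrel'
      set I1 := I.set (pvSlot L x.1) nitst with hI1
      have hlen1 : I1.length = L := by simp [hI1, hlen]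
      have hnitV : nitst ∈ V := by
        rw [hnitslot]
        rcases max_cases (I.getD (pvSlot L v) 0) x.2 with ⟨h, _⟩ | ⟨h, _⟩
        · rw [h]; exact hval _ hslotv
        · rw [h]; exact hx2 ▸ hewV
      have hval1 : ∀ k, k < L → I1.getD k 0 ∈ V := by
        intro k hk
        by_cases hke : k = pvSlot L x.1
        · subst hke; rw [hI1, pvGetD_set_eq _ _ _ (by omega)]; exact hnitV
        · rw [hI1, pvGetD_set_ne _ _ _ _ hke]; exact hval k hk
      have hI1v : I1.getD (pvSlot L v) 0 = I.getD (pvSlot L v) 0 := by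
        rw [hI1, pvGetD_set_ne _ _ _ _ hne.symm]
      have hI1x : I1.getD (pvSlot L x.1) 0 = nitst := by
        rw [hI1, pvGetD_set_eq _ _ _ (by omega)]
      have hQ1 : ∀ q ∈ Q ++ [(nitst, x.1)], PySem.Raise.InRange L q.2 ∧
          I1.getD (pvSlot L q.2) 0 ≤ q.1 := by
        intro q hq
        rcases List.mem_append.1 hq with hq | hq
        · obtain ⟨h1, h2⟩ := hQ q hq
          refine ⟨h1, ?_⟩
          by_cases hk : pvSlot L q.2 = pvSlot L x.1
          · rw [hk, hI1x]; rw [hk] at h2; omega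
          · rw [hI1, pvGetD_set_ne _ _ _ _ hk]; exact h2
        · rcases List.mem_singleton.1 hq with rfl
          exact ⟨hx1R, by rw [hI1x]⟩
      have hphi1 : (Q ++ [(nitst, x.1)]).length + pvPhiI V L I1 ≤ Q.length + pvPhiI V L I := by
        have heq := pvPhiI_set V L I (pvSlot L x.1) nitst hslotx (by omega)
        have hcb : pvCB V nitst < pvCB V (I.getD (pvSlot L x.1) 0) := by
          apply pvCB_lt hnitV
          rw [hnitslot]; exact hrel'
        simp only [List.length_append, List.length_singleton]
        rw [← hI1] at heq
        omega
      obtain ⟨c1, c2, c3, c4, c5, c6, c7, c8, c9⟩ := ih I1 (Q ++ [(nitst, x.1)]) hxs' hlen1 hval1 hQ1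
      rw [hsetslot]
      set r := xs.foldl _ (I1, Q ++ [(nitst, x.1)]) with hr
      have hrle : ∀ j, r.1.getD j 0 ≤ I1.getD j 0 := pvReach_le c2
      refine ⟨c1, pvReach_trans hreach1 c2, c3, by rw [c4, hI1v], c5, ?_, ?_, ?_, ?_⟩
      · intro q hq; exact c6 q (List.mem_append_left _ hq)
      · -- fresh coverage vs original I
        intro k hk
        rcases c7 k hk with hsame | hfresh
        · by_cases hke : k = pvSlot L x.1
          · subst hke
            refine Or.inr ⟨(nitst, x.1), c6 _ (List.mem_append_right _ (List.mem_singleton_self _)), rfl, ?_⟩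
            rw [hsame, hI1x]
          · rw [hsame, hI1, pvGetD_set_ne _ _ _ _ hke]
            exact Or.inl rfl
        · exact Or.inr hfresh
      · exact le_trans c8 hphi1
      · -- processed stability
        intro y hy
        rcases List.mem_cons.1 hy with rfl | hy'
        · calc r.1.getD (pvSlot L y.1) 0 ≤ I1.getD (pvSlot L y.1) 0 := hrle _
            _ = nitst := hI1x
            _ ≤ max (r.1.getD (pvSlot L v) 0) y.2 := by
                rw [c4, hI1v, ← hnitslot]
        · exact c9 y hy'
    · -- no push
      rw [if_neg hrel]
      obtain ⟨c1, c2, c3, c4, c5, c6, c7, c8, c9⟩ := ih I Q hxs' hlen hval hQ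
      set r := xs.foldl _ (I, Q) with hr
      have hrle : ∀ j, r.1.getD j 0 ≤ I.getD j 0 := pvReach_le c2
      refine ⟨c1, c2, c3, c4, c5, c6, c7, c8, ?_⟩
      intro y hy
      rcases List.mem_cons.1 hy with rfl | hy'
      · have hIx : I.getD (pvSlot L y.1) 0 ≤ nitst := by
          rw [pvGetD_slot I y.1 0 hx1I, hlen] at hrel
          omega
        calc r.1.getD (pvSlot L y.1) 0 ≤ I.getD (pvSlot L y.1) 0 := hrle _
          _ ≤ nitst := hIx
          _ ≤ max (r.1.getD (pvSlot L v) 0) y.2 := by rw [c4, ← hnitslot]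
      · exact c9 y hy'

lemma pvLoopA_spec (L : Nat) (V : List Int) (IS : List Bool) (adj : List (List (Int × Int)))
    (E0 : List (Int × Int × Int)) (hIS : IS.length = L) (hadjlen : adj.length = L)
    (hE0 : ∀ e ∈ E0, PySem.Raise.InRange L e.1 ∧ PySem.Raise.InRange L e.2.1 ∧ e.2.2 ∈ V)
    (hadj : ∀ v : Int, PySem.Raise.InRange L v → ∀ x : Int × Int,
      (x ∈ adj.getD (pvSlot L v) [] ↔
        ∃ e ∈ E0, pvSlot L e.1 = pvSlot L v ∧ x.1 = e.2.1 ∧ x.2 = e.2.2)) :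
    ∀ (fuel : Nat) (I : List Int) (Q : List (Int × Int)),
    I.length = L → (∀ k, k < L → I.getD k 0 ∈ V) →
    (∀ q ∈ Q, PySem.Raise.InRange L q.2 ∧ I.getD (pvSlot L q.2) 0 ≤ q.1) →
    (∀ k, k < L → IS.getD k false = false →
      pvStableAt (pvSE L IS E0) I k ∨ ∃ q ∈ Q, pvSlot L q.2 = k ∧ q.1 = I.getD k 0) →
    Q.length + pvPhiI V L I < fuel →
    (pvLoopA adj IS fuel I Q).length = L ∧
    pvReach (pvSE L IS E0) I (pvLoopA adj IS fuel I Q) ∧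
    pvStable (pvSE L IS E0) (pvLoopA adj IS fuel I Q) := by
  intro fuel
  induction fuel with
  | zero => intro I Q _ _ _ _ h; omega
  | succ fuel ih =>
    intro I Q hlen hval hQ hcov hfuel
    cases hpop : pvPopMin Q with
    | none =>
      have hQnil := pvPopMin_none hpop
      subst hQnil
      simp only [pvLoopA, hpop]
      refine ⟨hlen, pvReach.refl I, ?_⟩
      intro f hf
      have hf' := hf
      unfold pvSE at hf'
      rw [List.mem_filter] at hf'
      obtain ⟨hmap, hfilt⟩ := hf'
      obtain ⟨e, heE0, rfl⟩ := List.mem_map.1 hmap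
      have hsum : IS.getD (pvSlot L e.1) false = false := by simpa [List.getD] using hfilt
      have hkL : pvSlot L e.1 < L := pvSlot_lt (hE0 e heE0).1
      rcases hcov _ hkL hsum with hst | ⟨q, hq, _⟩
      · exact hst _ hf rfl
      · cases hq
    | some p =>
      obtain ⟨⟨itst, v⟩, Q'⟩ := p
      obtain ⟨hmQ, hQ'eq⟩ := pvPopMin_some hpop
      obtain ⟨hvR, hvle⟩ := hQ _ hmQ
      have hvI : PySem.Raise.InRange I.length v := by rw [hlen]; exact hvR
      have hvIS : PySem.Raise.InRange IS.length v := by rw [hIS]; exact hvR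
      have hQ'sub : ∀ q ∈ Q', q ∈ Q := by rw [hQ'eq]; exact fun q hq => List.erase_subset hq
      have hQ'len : Q'.length = Q.length - 1 := by rw [hQ'eq]; exact List.length_erase_of_mem hmQ
      have hQ' : ∀ q ∈ Q', PySem.Raise.InRange L q.2 ∧ I.getD (pvSlot L q.2) 0 ≤ q.1 :=
        fun q hq => hQ q (hQ'sub q hq)
      have hQlen0 : 0 < Q.length := List.length_pos_of_mem hmQ
      by_cases hsummit : PySem.List.pyGetD IS v false
      · -- summit: skip
        simp only [pvLoopA, hpop, hsummit, if_true]
        apply ih I Q' hlen hval hQ' _ (by omega)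
        intro k hk hksum
        rcases hcov k hk hksum with hst | ⟨q, hq, hqs, hqv⟩
        · exact Or.inl hst
        · refine Or.inr ⟨q, ?_, hqs, hqv⟩
          rw [hQ'eq]
          rcases eq_or_ne q (itst, v) with rfl | hne
          · exfalso
            rw [pvGetD_slot IS v false hvIS, hIS] at hsummit
            simp only at hqs
            rw [hqs] at hsummit
            rw [hksum] at hsummit
            cases hsummit
          · exact (List.mem_erase_of_ne hne).2 hq
      · by_cases hstale : PySem.List.pyGetD I v 0 < itst
        · -- stale entry: skip
          simp only [pvLoopA, hpop, hsummit, hstale, if_true, if_false, Bool.false_eq_true]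
          apply ih I Q' hlen hval hQ' _ (by omega)
          intro k hk hksum
          rcases hcov k hk hksum with hst | ⟨q, hq, hqs, hqv⟩
          · exact Or.inl hst
          · refine Or.inr ⟨q, ?_, hqs, hqv⟩
            rw [hQ'eq]
            rcases eq_or_ne q (itst, v) with rfl | hne
            · exfalso
              rw [pvGetD_slot I v 0 hvI, hlen] at hstale
              simp only at hqs hqv
              rw [hqs] at hstale
              omega
            · exact (List.mem_erase_of_ne hne).2 hq
        · -- process v
          have hvsum : IS.getD (pvSlot L v) false = false := by
            rw [pvGetD_slot IS v false hvIS, hIS] at hsummit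
            simpa using hsummit
          have hrowbridge : PySem.List.pyGetD adj v [] = adj.getD (pvSlot L v) [] := by
            rw [pvGetD_slot adj v [] (by rw [hadjlen]; exact hvR), hadjlen]
          obtain ⟨c1, c2, c3, c4, c5, c6, c7, c8, c9⟩ :=
            pvRelaxFoldA L V IS adj E0 hIS hE0 hadj v hvR hvsum
              (PySem.List.pyGetD adj v [])
              I Q' (by rw [hrowbridge]; exact fun x hx => hx) hlen hval hQ'
          simp only [pvLoopA, hpop, hsummit, hstale, if_false, Bool.false_eq_true]
          set r := (PySem.List.pyGetD adj v []).foldl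
            (fun (p : List Int × List (Int × Int)) nw =>
              let nitst := max (PySem.List.pyGetD p.1 v 0) nw.2
              if nitst < PySem.List.pyGetD p.1 nw.1 0 then
                (PySem.List.pySetD p.1 nw.1 nitst, p.2 ++ [(nitst, nw.1)])
              else p) (I, Q') with hr
          have hcov' : ∀ k, k < L → IS.getD k false = false →
              pvStableAt (pvSE L IS E0) r.1 k ∨
              ∃ q ∈ r.2, pvSlot L q.2 = k ∧ q.1 = r.1.getD k 0 := by
            intro k hk hksum
            by_cases hkv : k = pvSlot L v
            · -- the processed vertex is now stable
              subst hkv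
              left
              intro f hf hf1
              have hf' := hf
              unfold pvSE at hf'
              rw [List.mem_filter] at hf'
              obtain ⟨hmap, _⟩ := hf'
              obtain ⟨e, heE0, rfl⟩ := List.mem_map.1 hmap
              simp only at hf1 ⊢
              have hxmem : ((e.2.1, e.2.2) : Int × Int) ∈ adj.getD (pvSlot L v) [] :=
                (hadj v hvR (e.2.1, e.2.2)).2 ⟨e, heE0, hf1, rfl, rfl⟩
              rw [← hrowbridge] at hxmem
              have := c9 _ hxmem
              simpa using this
            · rcases c7 k hk with hsame | ⟨q, hq, hqs, hqv⟩
              · rcases hcov k hk hksum with hst | ⟨q, hq, hqs, hqv⟩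
                · exact Or.inl (pvStableAt_mono hst (pvReach_le c2) hsame)
                · refine Or.inr ⟨q, ?_, hqs, by rw [hsame]; exact hqv⟩
                  apply c6
                  rw [hQ'eq]
                  rcases eq_or_ne q (itst, v) with rfl | hne
                  · exact absurd hqs.symm (by simpa using hkv)
                  · exact (List.mem_erase_of_ne hne).2 hq
              · exact Or.inr ⟨q, hq, hqs, hqv⟩
          obtain ⟨d1, d2, d3⟩ := ih r.1 r.2 c1 c3 c5 hcov' (by omega)
          exact ⟨d1, pvReach_trans c2 d2, d3⟩

lemma pvMark_len (ss : List Int) (a : List Bool) :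
    (ss.foldl (fun a s => PySem.List.pySetD a s true) a).length = a.length := by
  induction ss generalizing a with
  | nil => rfl
  | cons s ss ih => rw [List.foldl_cons, ih]; exact PySem.List.length_pySetD ..

lemma pvMark_getD (ss : List Int) (a : List Bool)
    (h : ∀ s ∈ ss, PySem.Raise.InRange a.length s) (k : Nat) :
    (ss.foldl (fun a s => PySem.List.pySetD a s true) a).getD k false =
      (a.getD k false || ss.any (fun s => pvSlot a.length s == k)) := by
  induction ss generalizing a with
  | nil => simp
  | cons s ss ih =>
    have hs := h s (List.mem_cons_self ..)
    rw [List.foldl_cons, pvSetD_slot a s true hs]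
    have hlen : (a.set (pvSlot a.length s) true).length = a.length := by simp
    rw [ih _ (by rw [hlen]; exact fun x hx => h x (List.mem_cons_of_mem _ hx)), hlen]
    by_cases hk : k = pvSlot a.length s
    · subst hk
      rw [List.getD_eq_getElem?_getD, List.getElem?_set_self' ]
      simp [pvSlot_lt hs, Option.getD]
    · rw [List.getD_eq_getElem?_getD, List.getElem?_set_ne (by omega), ← List.getD_eq_getElem?_getD]
      have : (pvSlot a.length s == k) = false := by simpa using (Ne.symm hk)
      simp [this]

lemma pvGate_fst (gs : List Int) (I : List Int) (Q : List (Int × Int)) :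
    (gs.foldl (fun (p : List Int × List (Int × Int)) g =>
        (PySem.List.pySetD p.1 g 0, p.2 ++ [((0 : Int), g)])) (I, Q)).1 =
      gs.foldl (fun I g => PySem.List.pySetD I g (0 : Int)) I := by
  induction gs generalizing I Q with
  | nil => rfl
  | cons g gs ih => simp only [List.foldl_cons]; exact ih ..

lemma pvGate_snd (gs : List Int) (I : List Int) (Q : List (Int × Int)) :
    (gs.foldl (fun (p : List Int × List (Int × Int)) g =>
        (PySem.List.pySetD p.1 g 0, p.2 ++ [((0 : Int), g)])) (I, Q)).2 =
      Q ++ gs.map (fun g => ((0 : Int), g)) := by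
  induction gs generalizing I Q with
  | nil => simp
  | cons g gs ih => simp only [List.foldl_cons, List.map_cons]; rw [ih]; simp

lemma pvGate_len (gs : List Int) (I : List Int) :
    (gs.foldl (fun I g => PySem.List.pySetD I g (0 : Int)) I).length = I.length := by
  induction gs generalizing I with
  | nil => rfl
  | cons g gs ih => rw [List.foldl_cons, ih]; exact PySem.List.length_pySetD ..

lemma pvGate_getD (gs : List Int) (I : List Int)
    (h : ∀ g ∈ gs, PySem.Raise.InRange I.length g) (k : Nat) :
    (gs.foldl (fun I g => PySem.List.pySetD I g (0 : Int)) I).getD k 0 =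
      if gs.any (fun g => pvSlot I.length g == k) then 0 else I.getD k 0 := by
  induction gs generalizing I with
  | nil => simp
  | cons g gs ih =>
    have hg := h g (List.mem_cons_self ..)
    rw [List.foldl_cons, pvSetD_slot I g 0 hg]
    have hlen : (I.set (pvSlot I.length g) 0).length = I.length := by simp
    rw [ih _ (by rw [hlen]; exact fun x hx => h x (List.mem_cons_of_mem _ hx)), hlen]
    by_cases hk : k = pvSlot I.length g
    · subst hk
      simp only [List.any_cons, beq_self_eq_true, Bool.true_or, if_true]
      split
      · rfl
      · exact pvGetD_set_eq _ _ _ (by simpa using pvSlot_lt hg)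
    · have hbe : (pvSlot I.length g == k) = false := by simpa using (Ne.symm hk)
      simp only [List.any_cons, hbe, Bool.false_or]
      rw [pvGetD_set_ne _ _ _ _ hk]

lemma pvMem_dirEdges {paths : List (Int × Int × Int)} {d : Int × Int × Int} :
    d ∈ pvDirEdges paths ↔
      ∃ e ∈ paths, d = (e.1, e.2.1, e.2.2) ∨ d = (e.2.1, e.1, e.2.2) := by
  simp [pvDirEdges, List.mem_flatMap]

lemma pvAdj_len (ps : List (Int × Int × Int)) (a : List (List (Int × Int))) :
    (ps.foldl (fun a e =>
      let a1 := PySem.List.pySetD a e.1 (PySem.List.pyGetD a e.1 [] ++ [(e.2.1, e.2.2)])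
      PySem.List.pySetD a1 e.2.1 (PySem.List.pyGetD a1 e.2.1 [] ++ [(e.1, e.2.2)])) a).length
      = a.length := by
  induction ps generalizing a with
  | nil => rfl
  | cons e ps ih =>
    rw [List.foldl_cons, ih]
    rw [PySem.List.length_pySetD, PySem.List.length_pySetD]

lemma pvAdj_mem (L : Nat) (ps : List (Int × Int × Int)) (a : List (List (Int × Int)))
    (hlen : a.length = L)
    (h : ∀ e ∈ ps, PySem.Raise.InRange L e.1 ∧ PySem.Raise.InRange L e.2.1) :
    ∀ (k : Nat) (x : Int × Int),
    (x ∈ (ps.foldl (fun a e =>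
      let a1 := PySem.List.pySetD a e.1 (PySem.List.pyGetD a e.1 [] ++ [(e.2.1, e.2.2)])
      PySem.List.pySetD a1 e.2.1 (PySem.List.pyGetD a1 e.2.1 [] ++ [(e.1, e.2.2)])) a).getD k []
     ↔ x ∈ a.getD k [] ∨ ∃ e ∈ ps,
        (pvSlot L e.1 = k ∧ x = (e.2.1, e.2.2)) ∨ (pvSlot L e.2.1 = k ∧ x = (e.1, e.2.2))) := by
  induction ps generalizing a with
  | nil => simp
  | cons e ps ih =>
    intro k x
    obtain ⟨h1, h2⟩ := h e (List.mem_cons_self ..)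
    have h1a : PySem.Raise.InRange a.length e.1 := by rw [hlen]; exact h1
    rw [List.foldl_cons]
    set a1 := PySem.List.pySetD a e.1 (PySem.List.pyGetD a e.1 [] ++ [(e.2.1, e.2.2)]) with ha1
    have hlen1 : a1.length = L := by rw [ha1, PySem.List.length_pySetD, hlen]
    have h2a : PySem.Raise.InRange a1.length e.2.1 := by rw [hlen1]; exact h2
    set a2 := PySem.List.pySetD a1 e.2.1 (PySem.List.pyGetD a1 e.2.1 [] ++ [(e.1, e.2.2)]) with ha2
    have hlen2 : a2.length = L := by rw [ha2, PySem.List.length_pySetD, hlen1]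
    rw [ih a2 hlen2 (fun f hf => h f (List.mem_cons_of_mem _ hf)) k x]
    have hga1 : ∀ j : Nat, a1.getD j [] =
        if j = pvSlot L e.1 then a.getD (pvSlot L e.1) [] ++ [(e.2.1, e.2.2)] else a.getD j [] := by
      intro j
      rw [ha1, pvSetD_slot a e.1 _ h1a, pvGetD_slot a e.1 [] h1a, hlen]
      by_cases hj : j = pvSlot L e.1
      · subst hj; rw [if_pos rfl]; exact pvGetD_set_eq' _ _ _ _ (by rw [hlen]; exact pvSlot_lt h1)
      · rw [if_neg hj]; exact pvGetD_set_ne' _ _ _ _ _ hj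
    have hga2 : ∀ j : Nat, a2.getD j [] =
        if j = pvSlot L e.2.1 then a1.getD (pvSlot L e.2.1) [] ++ [(e.1, e.2.2)] else a1.getD j [] := by
      intro j
      rw [ha2, pvSetD_slot a1 e.2.1 _ h2a, pvGetD_slot a1 e.2.1 [] h2a, hlen1]
      by_cases hj : j = pvSlot L e.2.1
      · subst hj; rw [if_pos rfl]; exact pvGetD_set_eq' _ _ _ _ (by rw [hlen1]; exact pvSlot_lt h2)
      · rw [if_neg hj]; exact pvGetD_set_ne' _ _ _ _ _ hj
    constructor
    · rintro (hx | ⟨f, hf, hcase⟩)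
      · rw [hga2] at hx
        by_cases hj2 : k = pvSlot L e.2.1
        · rw [if_pos hj2] at hx
          rcases List.mem_append.1 hx with hx | hx
          · rw [hga1] at hx
            by_cases hj1 : pvSlot L e.2.1 = pvSlot L e.1
            · rw [if_pos hj1] at hx
              rcases List.mem_append.1 hx with hx | hx
              · left; rw [hj2, hj1]; exact hx
              · right; exact ⟨e, List.mem_cons_self .., Or.inl ⟨by omega, List.mem_singleton.1 hx⟩⟩
            · rw [if_neg hj1] at hx
              left; rwa [hj2]
          · right; exact ⟨e, List.mem_cons_self .., Or.inr ⟨hj2.symm, List.mem_singleton.1 hx⟩⟩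
        · rw [if_neg hj2, hga1] at hx
          by_cases hj1 : k = pvSlot L e.1
          · rw [if_pos hj1] at hx
            rcases List.mem_append.1 hx with hx | hx
            · left; rwa [hj1]
            · right; exact ⟨e, List.mem_cons_self .., Or.inl ⟨hj1.symm, List.mem_singleton.1 hx⟩⟩
          · rw [if_neg hj1] at hx; left; exact hx
      · right; exact ⟨f, List.mem_cons_of_mem _ hf, hcase⟩
    · rintro (hx | ⟨f, hf, hcase⟩)
      · left
        rw [hga2]
        by_cases hj2 : k = pvSlot L e.2.1
        · rw [if_pos hj2, hga1]
          by_cases hj1 : pvSlot L e.2.1 = pvSlot L e.1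
          · rw [if_pos hj1]
            apply List.mem_append_left; apply List.mem_append_left
            rw [hj2, hj1] at hx; exact hx
          · rw [if_neg hj1]
            apply List.mem_append_left; rwa [← hj2]
        · rw [if_neg hj2, hga1]
          by_cases hj1 : k = pvSlot L e.1
          · rw [if_pos hj1]
            apply List.mem_append_left; rwa [← hj1]
          · rw [if_neg hj1]; exact hx
      · rcases List.mem_cons.1 hf with rfl | hf'
        · left
          rcases hcase with ⟨hsl, rfl⟩ | ⟨hsl, rfl⟩
          · rw [hga2]
            by_cases hj2 : k = pvSlot L f.2.1
            · rw [if_pos hj2, hga1, if_pos (by omega)]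
              apply List.mem_append_left
              exact List.mem_append_right _ (List.mem_singleton_self _)
            · rw [if_neg hj2, hga1, if_pos hsl.symm]
              exact List.mem_append_right _ (List.mem_singleton_self _)
          · rw [hga2, if_pos hsl.symm]
            exact List.mem_append_right _ (List.mem_singleton_self _)
        · right; exact ⟨f, hf', hcase⟩

lemma pvAny_ofList (l : List Int) (p : Int → Bool) :
    (PySem.Set.ofList l).any p = l.any p := by
  apply Bool.eq_iff_iff.2
  simp only [List.any_eq_true]
  constructor
  · rintro ⟨x, hx, hp⟩; exact ⟨x, (PySem.Set.mem_ofList l x).1 hx, hp⟩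
  · rintro ⟨x, hx, hp⟩; exact ⟨x, (PySem.Set.mem_ofList l x).2 hx, hp⟩

lemma pvPhiI_le (V : List Int) (L : Nat) (I : List Int) :
    pvPhiI V L I ≤ L * V.length := by
  unfold pvPhiI
  calc ∑ k ∈ Finset.range L, pvCB V (I.getD k 0)
      ≤ ∑ _k ∈ Finset.range L, V.length := by
        apply Finset.sum_le_sum
        intro k _
        exact le_trans (Finset.card_filter_le _ _) (List.toFinset_card_le V)
    _ = L * V.length := by simp [Finset.sum_const, Finset.card_range]

theorem pv_main (n : Int) (paths : List (Int × Int × Int)) (gates : List Int) (summits : List Int)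
    (hpre : Pre_solution n paths gates summits) :
    solution n paths gates summits = solution_alt n paths gates summits := by
  obtain ⟨hprePaths, hpreGates, hpreSummits⟩ := hpre
  set L := (n + 1).toNat with hL
  set inf := 10000000 * n with hinf
  set V : List Int := 0 :: inf :: paths.map (fun e => e.2.2) with hV
  set E0 := pvDirEdges paths with hE0def
  -- the two summit arrays coincide
  set ISB := summits.foldl (fun a s => PySem.List.pySetD a s true) (List.replicate L false) with hISB
  set ISA := (PySem.Set.ofList summits).foldl (fun a s => PySem.List.pySetD a s true)
      (List.replicate L false) with hISA
  have hISlenA : ISA.length = L := by rw [hISA, pvMark_len]; simp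
  have hISlenB : ISB.length = L := by rw [hISB, pvMark_len]; simp
  have hsummitsR : ∀ s ∈ summits, PySem.Raise.InRange (List.replicate L false).length s := by
    intro s hs; rw [List.length_replicate]; exact hpreSummits s hs
  have hISeq : ISA = ISB := by
    apply List.ext_getElem (by rw [hISlenA, hISlenB])
    intro k hk1 hk2
    rw [← List.getD_eq_getElem ISA false hk1, ← List.getD_eq_getElem ISB false hk2]
    rw [hISA, hISB, pvMark_getD _ _ (fun s hs => hsummitsR s ((PySem.Set.mem_ofList summits s).1 hs)) k,
      pvMark_getD _ _ hsummitsR k]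
    simp only [List.length_replicate]
    rw [pvAny_ofList]
  -- the two initial intensity arrays coincide
  set I0 := gates.foldl (fun I g => PySem.List.pySetD I g (0 : Int)) (List.replicate L inf) with hI0
  have hI0len : I0.length = L := by rw [hI0, pvGate_len]; simp
  have hgatesR : ∀ g ∈ gates, PySem.Raise.InRange (List.replicate L inf).length g := by
    intro g hg; rw [List.length_replicate]; exact hpreGates g hg
  have hI0getD : ∀ k, k < L → I0.getD k 0 =
      if gates.any (fun g => pvSlot L g == k) then 0 else inf := by
    intro k hk
    rw [hI0, pvGate_getD gates _ hgatesR k]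
    simp only [List.length_replicate]
    rw [List.getD_replicate _ hk]
  -- shared hypotheses
  have hE0 : ∀ e ∈ E0, PySem.Raise.InRange L e.1 ∧ PySem.Raise.InRange L e.2.1 ∧ e.2.2 ∈ V := by
    intro e he
    obtain ⟨f, hf, hor⟩ := pvMem_dirEdges.1 he
    obtain ⟨h1, h2⟩ := hprePaths f hf
    have hw : f.2.2 ∈ V := by
      rw [hV]; right; right; exact List.mem_map.2 ⟨f, hf, rfl⟩
    rcases hor with rfl | rfl
    · exact ⟨h1, h2, hw⟩
    · exact ⟨h2, h1, hw⟩
  have hval0 : ∀ k, k < L → I0.getD k 0 ∈ V := by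
    intro k hk
    rw [hI0getD k hk]
    split
    · rw [hV]; exact List.mem_cons_self ..
    · rw [hV]; right; exact List.mem_cons_self ..
  have hinfpos : 0 < L → 0 ≤ inf := by
    intro h
    rw [hinf]
    have : 0 ≤ n := by omega
    positivity
  have hI0le : ∀ k, k < L → I0.getD k 0 ≤ inf := by
    intro k hk
    rw [hI0getD k hk]
    split
    · exact hinfpos (by omega)
    · exact le_refl _
  have hphi0 : pvPhiI V L I0 ≤ L * (paths.length + 2) := by
    have h1 := pvPhiI_le V L I0
    have hVlen : V.length = paths.length + 2 := by simp [hV]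
    rw [hVlen] at h1
    exact h1
  -- the adjacency structure of port A describes exactly the directed edges E0
  set adj := paths.foldl (fun a e =>
      let a1 := PySem.List.pySetD a e.1 (PySem.List.pyGetD a e.1 [] ++ [(e.2.1, e.2.2)])
      PySem.List.pySetD a1 e.2.1 (PySem.List.pyGetD a1 e.2.1 [] ++ [(e.1, e.2.2)]))
    (List.replicate L ([] : List (Int × Int))) with hadjdef
  have hadjlen : adj.length = L := by rw [hadjdef, pvAdj_len]; simp
  have hadj : ∀ v : Int, PySem.Raise.InRange L v → ∀ x : Int × Int,
      (x ∈ adj.getD (pvSlot L v) [] ↔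
        ∃ e ∈ E0, pvSlot L e.1 = pvSlot L v ∧ x.1 = e.2.1 ∧ x.2 = e.2.2) := by
    intro v hv x
    rw [hadjdef, pvAdj_mem L paths _ (by simp) hprePaths (pvSlot L v) x]
    rw [List.getD_replicate _ (pvSlot_lt hv)]
    simp only [List.not_mem_nil, false_or]
    constructor
    · rintro ⟨e, he, ⟨hsl, rfl⟩ | ⟨hsl, rfl⟩⟩
      · exact ⟨(e.1, e.2.1, e.2.2), pvMem_dirEdges.2 ⟨e, he, Or.inl rfl⟩, hsl, rfl, rfl⟩
      · exact ⟨(e.2.1, e.1, e.2.2), pvMem_dirEdges.2 ⟨e, he, Or.inr rfl⟩, hsl, rfl, rfl⟩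
    · rintro ⟨d, hd, hsl, hx1, hx2⟩
      obtain ⟨e, he, rfl | rfl⟩ := pvMem_dirEdges.1 hd
      · exact ⟨e, he, Or.inl ⟨hsl, by ext <;> simp [hx1, hx2]⟩⟩
      · exact ⟨e, he, Or.inr ⟨hsl, by ext <;> simp [hx1, hx2]⟩⟩
  -- A's initial queue
  set Q0 := gates.map (fun g => ((0 : Int), g)) with hQ0def
  have hQ0 : ∀ q ∈ Q0, PySem.Raise.InRange L q.2 ∧ I0.getD (pvSlot L q.2) 0 ≤ q.1 := by
    intro q hq
    obtain ⟨g, hg, rfl⟩ := List.mem_map.1 hq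
    refine ⟨hpreGates g hg, ?_⟩
    have hk : pvSlot L g < L := pvSlot_lt (hpreGates g hg)
    rw [hI0getD _ hk, if_pos]
    rw [List.any_eq_true]
    exact ⟨g, hg, by simp⟩
  have hcov0 : ∀ k, k < L → ISA.getD k false = false →
      pvStableAt (pvSE L ISA E0) I0 k ∨ ∃ q ∈ Q0, pvSlot L q.2 = k ∧ q.1 = I0.getD k 0 := by
    intro k hk _
    by_cases hg : gates.any (fun g => pvSlot L g == k)
    · right
      obtain ⟨g, hgm, hgs⟩ := List.any_eq_true.1 hg
      refine ⟨(0, g), List.mem_map.2 ⟨g, hgm, rfl⟩, by simpa using hgs, ?_⟩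
      rw [hI0getD k hk, if_pos hg]
    · left
      intro f hf hf1
      have hfE := hf
      unfold pvSE at hfE
      rw [List.mem_filter] at hfE
      obtain ⟨hmap, _⟩ := hfE
      obtain ⟨d, hd, rfl⟩ := List.mem_map.1 hmap
      obtain ⟨_, hd2, _⟩ := hE0 d hd
      simp only at hf1 ⊢
      have hIk : I0.getD k 0 = inf := by
        rw [hI0getD k hk, if_neg hg]
      rw [hIk]
      calc I0.getD (pvSlot L d.2.1) 0 ≤ inf := hI0le _ (pvSlot_lt hd2)
        _ ≤ max inf d.2.2 := le_max_left _ _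
  -- run the A loop
  obtain ⟨a1, a2, a3⟩ := pvLoopA_spec L V ISA adj E0 hISlenA hadjlen hE0 hadj
    (Q0.length + L * (paths.length + 2) + 1) I0 Q0 hI0len hval0 hQ0 hcov0 (by omega)
  -- run the B loop
  have hedgesB : paths.foldl (fun es e => es ++ [(e.1, e.2.1, e.2.2), (e.2.1, e.1, e.2.2)])
      ([] : List (Int × Int × Int)) = E0 := by
    rw [hE0def]
    unfold pvDirEdges
    exact PySem.List.foldl_append_eq_flatMap _ paths []
  obtain ⟨b1, b2, b3⟩ := pvLoopB_spec L V ISB E0 hISlenB hE0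
    (L * (paths.length + 2) + 1) I0 hI0len hval0 (by omega)
  -- the two final arrays are equal
  rw [hISeq] at a2 a3
  have hAB : pvLoopA adj ISB (Q0.length + L * (paths.length + 2) + 1) I0 Q0 =
      pvLoopB E0 ISB (L * (paths.length + 2) + 1) I0 :=
    pvReach_stable_eq a2 a3 b2 b3
  -- unfold both ports and rewrite
  show solution n paths gates summits = solution_alt n paths gates summits
  unfold solution solution_alt
  simp only [← hL, ← hinf, ← hadjdef, ← hISA, ← hISB]
  rw [pvGate_fst, pvGate_snd, ← hI0, hedgesB]
  simp only [← hQ0def, List.nil_append]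
  rw [hISeq, hAB]

-- ===== VERDICT (by name: the statement is the Claim_ definition above) =====
theorem solution_spec : Claim_equal_solution := by
  intro n paths gates summits _ hpre
  show solution n paths gates summits = solution_alt n paths gates summits
  exact pv_main n paths gates summits hpre
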